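-- pv_equiv track=rewrite | github.com/Princekrcoder/hackthon_c_square | classifier.py | extract_keywords
-- ===== SOURCE A (Python) =====
-- def extract_keywords(text: str, keyword_dict: dict) -> dict:
--     """
--     Extract keywords from text grouped by category.
--
--     Performs case-insensitive matching of each keyword in keyword_dict
--     against the input text. Categories with no matches are omitted from
--     the result.
--
--     Args:
--         text: The input text to search within.
--         keyword_dict: A dict mapping category keys to lists of keyword strings.
--
--     Returns:
--         A dict mapping each category key to a list of matched keywords.
--         Categories with no matches are not included.
--     """
--     lower_text = text.lower() if text else ""
--     result = {}
--
--     for category, keywords in keyword_dict.items():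
--         matches = [kw for kw in keywords if kw.lower() in lower_text]
--         if matches:
--             result[category] = matches
--
--     return result
-- ===== SOURCE B (Python) =====
-- def extract_keywords(text: str, keyword_dict: dict) -> dict:
--     # Substring-index reimplementation: build one set of all substrings of the
--     # lowered text whose lengths occur among the keywords, then each keyword
--     # test is a single set lookup instead of a scan of the whole text.
--     lower_text = text.lower() if text else ""
--     n = len(lower_text)
--     lengths = {len(kw) for kws in keyword_dict.values() for kw in kws}
--     subs = {lower_text[i:i + d] for d in lengths for i in range(n - d + 1)}
--     result = {}
--     for category, keywords in keyword_dict.items():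
--         matches = [kw for kw in keywords if kw.lower() in subs]
--         if matches:
--             result[category] = matches
--     return result
-- ===== Notes on version B (the rewrite author's own statement) =====
-- stated objective: faster
-- what changed: B precomputes one set of all substrings of the lowered text at the occurring keyword lengths, turning each per-keyword substring scan of the text into a single hash-set lookup.
import Mathlib
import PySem

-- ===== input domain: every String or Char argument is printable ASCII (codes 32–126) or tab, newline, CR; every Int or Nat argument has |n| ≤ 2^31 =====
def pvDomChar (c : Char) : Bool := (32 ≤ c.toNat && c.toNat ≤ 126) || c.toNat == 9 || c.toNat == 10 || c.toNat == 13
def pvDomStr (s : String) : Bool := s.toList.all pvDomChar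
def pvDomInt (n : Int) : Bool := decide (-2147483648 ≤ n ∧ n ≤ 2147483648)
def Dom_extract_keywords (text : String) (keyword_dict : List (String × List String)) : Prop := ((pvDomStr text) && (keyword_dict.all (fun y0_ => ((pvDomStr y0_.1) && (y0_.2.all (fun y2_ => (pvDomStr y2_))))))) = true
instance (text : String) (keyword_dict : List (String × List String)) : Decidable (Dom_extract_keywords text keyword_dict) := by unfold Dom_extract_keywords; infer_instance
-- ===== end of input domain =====

-- B replaces A's per-keyword substring scan of the text by a precomputed set of all substrings
-- of the lowered text at the occurring keyword lengths; a timing run measured B faster.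


-- ===== PORT A =====
def extract_keywords (text : String) (keyword_dict : List (String × List String)) : List (String × List String) :=
  let lower_text := if text ≠ "" then PySem.Str.lower text else ""
  let result : PySem.Dict String (List String) :=
    keyword_dict.foldl
      (fun result p =>
        let matched := p.2.filter (fun kw => PySem.Str.isIn (PySem.Str.lower kw) lower_text)
        if matched.isEmpty = false then result.insert p.1 matched else result)
      PySem.Dict.empty
  result.items

-- ===== PORT B =====
-- helper: B's substring index  {lower_text[i:i+d] for d in lengths for i in range(n-d+1)}
def pvSubsIndex (lower_text : String) (lengths : PySem.Set Int) : PySem.Set String :=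
  PySem.Set.ofList (List.flatMap (fun d =>
    (PySem.List.pyRange 0 (PySem.Str.len lower_text - d + 1) 1).map
      (fun i => PySem.Str.slice lower_text (some i) (some (i + d)))) lengths)

def extract_keywords_alt (text : String) (keyword_dict : List (String × List String)) : List (String × List String) :=
  let lower_text := if text ≠ "" then PySem.Str.lower text else ""
  let lengths : PySem.Set Int :=
    PySem.Set.ofList (keyword_dict.flatMap (fun p => p.2.map (fun kw => PySem.Str.len kw)))
  let subs : PySem.Set String := pvSubsIndex lower_text lengths
  let result : PySem.Dict String (List String) :=
    keyword_dict.foldl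
      (fun result p =>
        let matched := p.2.filter (fun kw => PySem.Set.contains subs (PySem.Str.lower kw))
        if matched.isEmpty = false then result.insert p.1 matched else result)
      PySem.Dict.empty
  result.items

-- ===== PRECONDITION & SPEC =====
def Spec_extract_keywords (text : String) (keyword_dict : List (String × List String)) (out : List (String × List String)) : Prop := out = extract_keywords_alt text keyword_dict
instance (text : String) (keyword_dict : List (String × List String)) (out : List (String × List String)) : Decidable (Spec_extract_keywords text keyword_dict out) := by unfold Spec_extract_keywords; infer_instance

-- ===== CLAIM (what is proved, stated in full; the proofs are below) =====
def Claim_equal_extract_keywords : Prop := ∀ (text : String) (keyword_dict : List (String × List String)), Dom_extract_keywords text keyword_dict → Spec_extract_keywords text keyword_dict (extract_keywords text keyword_dict)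

-- ===== LEMMAS AND PROOFS =====

-- lowering a string keeps its length
theorem pv_length_lower (s : String) : (PySem.Str.lower s).toList.length = s.toList.length := by
  rw [PySem.Str.toList_lower]
  simp [PySem.Chars.lower]

-- membership in B's substring set, for any string whose length occurs in lens
-- (lens all nonnegative), is exactly Python's `w in lt`
theorem pv_contains_subs (lt : String) (lens : List Int) (w : String)
    (hpos : ∀ d ∈ lens, 0 ≤ d)
    (hlen : (w.toList.length : Int) ∈ lens) :
    PySem.Set.contains (pvSubsIndex lt (PySem.Set.ofList lens)) w = PySem.Str.isIn w lt := by
  unfold pvSubsIndex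
  have hn : PySem.Str.len lt = (lt.toList.length : Int) := by
    simp [PySem.Str.len]
  rw [Bool.eq_iff_iff, PySem.Set.contains_iff, PySem.Set.mem_ofList,
      PySem.Str.isIn_iff_infix, List.mem_flatMap]
  constructor
  · rintro ⟨d, hd, hw⟩
    have hd0 : 0 ≤ d := hpos d ((PySem.Set.mem_ofList lens d).1 hd)
    rw [List.mem_map] at hw
    obtain ⟨i, hi, hslice⟩ := hw
    rw [PySem.List.mem_pyRange_iff_of_pos (by norm_num)] at hi
    obtain ⟨hi0, -, -⟩ := hi
    have htl : w.toList = (lt.toList.drop i.toNat).take d.toNat := by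
      rw [← hslice, PySem.Str.toList_slice, PySem.Chars.slice_eq_listSlice]
      have h1 : i = ((i.toNat : Nat) : Int) := (Int.toNat_of_nonneg hi0).symm
      have h2 : d = ((d.toNat : Nat) : Int) := (Int.toNat_of_nonneg hd0).symm
      rw [h1, h2, PySem.List.slice_natCast_add]
      simp
      rw [max_eq_left hd0, max_eq_left hi0]
    rw [htl]
    exact ⟨lt.toList.take i.toNat, (lt.toList.drop i.toNat).drop d.toNat, by
      rw [List.append_assoc, List.take_append_drop, List.take_append_drop]⟩
  · rintro ⟨pre, suf, hsplit⟩
    refine ⟨(w.toList.length : Int), (PySem.Set.mem_ofList lens _).2 hlen, ?_⟩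
    rw [List.mem_map]
    have hlen2 : pre.length + w.toList.length + suf.length = lt.toList.length := by
      rw [← hsplit]; simp; omega
    refine ⟨(pre.length : Int), ?_, ?_⟩
    · rw [PySem.List.mem_pyRange_iff_of_pos (by norm_num)]
      refine ⟨by positivity, by rw [hn]; omega, by simp⟩
    · rw [← String.toList_inj, PySem.Str.toList_slice, PySem.Chars.slice_eq_listSlice,
          PySem.List.slice_natCast_add]
      rw [← hsplit, List.append_assoc, List.drop_left, List.take_left]

-- the common result loop, with pointwise-equal match predicates
theorem pv_fold_eq (l : List (String × List String)) (P Q : String → Bool)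
    (h : ∀ p ∈ l, ∀ kw ∈ p.2, P kw = Q kw) (acc : PySem.Dict String (List String)) :
    l.foldl (fun result p =>
        let matched := p.2.filter P
        if matched.isEmpty = false then result.insert p.1 matched else result) acc
    = l.foldl (fun result p =>
        let matched := p.2.filter Q
        if matched.isEmpty = false then result.insert p.1 matched else result) acc := by
  induction l generalizing acc with
  | nil => rfl
  | cons hd tl ih =>
    simp only [List.foldl_cons]
    rw [List.filter_congr (fun kw hkw => h hd (by simp) kw hkw)]
    exact ih (fun p hp => h p (by simp [hp])) _

-- ===== VERDICT (by name: the statement is the Claim_ definition above) =====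
theorem extract_keywords_spec : Claim_equal_extract_keywords := by
  intro text keyword_dict _
  unfold Spec_extract_keywords extract_keywords extract_keywords_alt
  dsimp only
  congr 1
  apply pv_fold_eq
  intro p hp kw hkw
  rw [pv_contains_subs]
  · intro d hd
    rw [List.mem_flatMap] at hd
    obtain ⟨q, -, hd⟩ := hd
    rw [List.mem_map] at hd
    obtain ⟨kw', -, rfl⟩ := hd
    simp [PySem.Str.len]
  · rw [List.mem_flatMap]
    refine ⟨p, hp, ?_⟩
    rw [List.mem_map]
    refine ⟨kw, hkw, ?_⟩
    rw [pv_length_lower]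
    simp [PySem.Str.len]
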